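-- pv_equiv track=rewrite | github.com/bioconda/bioconda-recipes | recipes/xTea/xTea/x_transduction.py | parse_s_cigar
-- ===== SOURCE A (Python) =====
-- def parse_s_cigar(s_cigar):
--     s_len=""
--     n_map=0
--     n_all=0
--     for ch in s_cigar:
--         if ch>="0" and ch<="9":
--             s_len+=ch
--         else:
--             tmp_len=int(s_len)
--             if ch=="M":
--                 n_map+=tmp_len
--             n_all+=tmp_len
--             s_len=""
--     return n_map, n_all
-- ===== SOURCE B (Python) =====
-- import re
--
--
-- def parse_s_cigar(s_cigar):
--     n_map = 0
--     n_all = 0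
--     for s_digits, s_op in re.findall(r'(\d*)(\D)', s_cigar):
--         tmp_len = int(s_digits)
--         n_all += tmp_len
--         if s_op == "M":
--             n_map += tmp_len
--     return n_map, n_all
-- ===== Notes on version B (the rewrite author's own statement) =====
-- stated objective: idiomatic
-- what changed: B replaces A's character-by-character loop with a mutable digit-accumulator string by a re.findall(r'(\d*)(\D)') tokenization of the whole CIGAR string into (digits, op) pairs followed by a single pass over the pairs; because the digit group may be empty, B raises ValueError on exactly the same malformed inputs as A.
import Mathlib
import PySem

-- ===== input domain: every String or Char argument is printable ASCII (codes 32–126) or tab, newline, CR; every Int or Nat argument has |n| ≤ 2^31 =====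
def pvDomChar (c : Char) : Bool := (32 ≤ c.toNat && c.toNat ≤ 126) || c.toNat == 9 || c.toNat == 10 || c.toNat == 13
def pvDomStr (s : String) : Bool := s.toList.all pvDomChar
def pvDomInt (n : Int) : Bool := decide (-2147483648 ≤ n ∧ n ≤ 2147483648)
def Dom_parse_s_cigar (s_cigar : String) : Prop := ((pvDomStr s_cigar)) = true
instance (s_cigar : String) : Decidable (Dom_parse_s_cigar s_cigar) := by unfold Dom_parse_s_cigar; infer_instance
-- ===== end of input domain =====

-- B replaces A's char-by-char accumulator loop by a regex tokenization (re.findall of (\d*)(\D)) followed by one pass over the tokens; equal return values, and B raises ValueError exactly where A does (those inputs are outside Pre_).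

-- ===== PORT A =====
-- A's for-loop over the characters: state (s_len, n_map, n_all); int(s_len) is
-- PySem.Int.ofStr?, whose `none` (= ValueError) aborts the loop; the final .getD
-- is reached only outside Pre_parse_s_cigar (where the Python raises).
def pvLoopA : List Char → List Char → Int → Int → Option (Int × Int)
  | [], _, n_map, n_all => some (n_map, n_all)
  | ch :: rest, s_len, n_map, n_all =>
    if '0' ≤ ch ∧ ch ≤ '9' then
      pvLoopA rest (s_len ++ [ch]) n_map n_all
    else
      match PySem.Int.ofStr? (String.ofList s_len) with
      | none => none
      | some tmp_len =>
          pvLoopA rest [] (if ch = 'M' then n_map + tmp_len else n_map) (n_all + tmp_len)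

def parse_s_cigar (s_cigar : String) : Int × Int :=
  (pvLoopA s_cigar.toList [] 0 0).getD (0, 0)

-- ===== PORT B =====
-- re.findall(r'(\d*)(\D)', s): each match is the maximal digit run at the scan
-- position followed by one non-digit; a trailing digit run matches nothing.
def pvTokensB (l : List Char) : List (List Char × Char) :=
  match h : l.dropWhile Char.isDigit with
  | [] => []
  | op :: rest => (l.takeWhile Char.isDigit, op) :: pvTokensB rest
termination_by l.length
decreasing_by
  have hle := List.length_dropWhile_le Char.isDigit l
  rw [h] at hle
  simp at hle ⊢
  omega

-- the for-loop of Source B over the token pairs; int(s_digits) = PySem.Int.ofChars?,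
-- `none` (= ValueError on an empty digit group) aborts as in the Python.
def pvFoldB : List (List Char × Char) → Int → Int → Option (Int × Int)
  | [], n_map, n_all => some (n_map, n_all)
  | (s_digits, s_op) :: toks, n_map, n_all =>
    match PySem.Int.ofChars? s_digits with
    | none => none
    | some tmp_len =>
        pvFoldB toks (if s_op = 'M' then n_map + tmp_len else n_map) (n_all + tmp_len)

def parse_s_cigar_alt (s_cigar : String) : Int × Int :=
  (pvFoldB (pvTokensB s_cigar.toList) 0 0).getD (0, 0)

-- ===== PRECONDITION & SPEC =====
def pvDig (c : Char) : Bool := decide ('0' ≤ c) && decide (c ≤ '9')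

-- Pre_ excludes exactly the inputs on which Python A raises ValueError (int of an empty accumulator):
-- a non-digit character that is first or preceded by another non-digit.
def Pre_parse_s_cigar (s_cigar : String) : Prop :=
  s_cigar.toList.head?.all pvDig = true ∧
  List.IsChain (fun a b => pvDig a = true ∨ pvDig b = true) s_cigar.toList

instance (s_cigar : String) : Decidable (Pre_parse_s_cigar s_cigar) := by
  unfold Pre_parse_s_cigar; infer_instance

def pvWitness_parse_s_cigar : String := "10M2I35M"

def Spec_parse_s_cigar (s_cigar : String) (out : Int × Int) : Prop := out = parse_s_cigar_alt s_cigar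
instance (s_cigar : String) (out : Int × Int) : Decidable (Spec_parse_s_cigar s_cigar out) := by unfold Spec_parse_s_cigar; infer_instance

-- ===== CLAIM (what is proved, stated in full; the proofs are below) =====
def Claim_equal_parse_s_cigar : Prop := ∀ (s_cigar : String), Dom_parse_s_cigar s_cigar → Pre_parse_s_cigar s_cigar → Spec_parse_s_cigar s_cigar (parse_s_cigar s_cigar)

-- ===== LEMMAS AND PROOFS =====

lemma pvIsDigit_iff (c : Char) : c.isDigit = true ↔ ('0' ≤ c ∧ c ≤ '9') := by
  simp [Char.isDigit, Char.le_def]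

lemma pvTokensB_nil_of_digits (l : List Char) (h : ∀ c ∈ l, c.isDigit = true) :
    pvTokensB l = [] := by
  unfold pvTokensB
  split
  · rfl
  · rename_i op rest hdrop
    exfalso
    have : l.dropWhile Char.isDigit = [] := List.dropWhile_eq_nil_iff.mpr h
    rw [hdrop] at this
    simp at this

lemma pvTokensB_run_cons (run : List Char) (c : Char) (rest : List Char)
    (hrun : ∀ x ∈ run, x.isDigit = true) (hc : c.isDigit = false) :
    pvTokensB (run ++ c :: rest) = (run, c) :: pvTokensB rest := by
  have hdropRun : run.dropWhile Char.isDigit = [] := List.dropWhile_eq_nil_iff.mpr hrun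
  have htakeRun : run.takeWhile Char.isDigit = run := by
    rw [List.takeWhile_eq_self_iff]; exact hrun
  have hdrop : (run ++ c :: rest).dropWhile Char.isDigit = c :: rest := by
    rw [List.dropWhile_append, hdropRun]
    simp [hc]
  have htake : (run ++ c :: rest).takeWhile Char.isDigit = run := by
    rw [List.takeWhile_append, htakeRun]
    simp [hc]
  conv_lhs => unfold pvTokensB
  split
  · rename_i hnil
    rw [hdrop] at hnil; cases hnil
  · rename_i op rest' hdrop'
    rw [hdrop] at hdrop'
    cases hdrop'
    rw [htake]

-- the central invariant: A's loop with pending digit run `run` computes what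
-- B's token fold computes on the tokens of `run ++ l`.
lemma pvMain : ∀ (l run : List Char) (n_map n_all : Int),
    (∀ c ∈ run, c.isDigit = true) →
    pvLoopA l run n_map n_all = pvFoldB (pvTokensB (run ++ l)) n_map n_all := by
  intro l
  induction l with
  | nil =>
    intro run n_map n_all hrun
    rw [List.append_nil, pvTokensB_nil_of_digits run hrun]
    simp [pvLoopA, pvFoldB]
  | cons c rest ih =>
    intro run n_map n_all hrun
    by_cases hc : ('0' ≤ c ∧ c ≤ '9')
    · have hcd : c.isDigit = true := (pvIsDigit_iff c).mpr hc
      have : run ++ c :: rest = (run ++ [c]) ++ rest := by simp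
      rw [this]
      have hrun' : ∀ x ∈ run ++ [c], x.isDigit = true := by
        intro x hx
        rcases List.mem_append.mp hx with h | h
        · exact hrun x h
        · simp at h; subst h; exact hcd
      rw [← ih (run ++ [c]) n_map n_all hrun']
      simp [pvLoopA, hc]
    · have hcd : c.isDigit = false := by
        by_contra h
        exact hc ((pvIsDigit_iff c).mp (by simpa using h))
      rw [pvTokensB_run_cons run c rest hrun hcd]
      show pvLoopA (c :: rest) run n_map n_all = _
      rw [pvLoopA]
      rw [if_neg hc]
      rw [PySem.Int.ofStr?_ofList]
      rw [pvFoldB]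
      cases hv : PySem.Int.ofChars? run with
      | none => rfl
      | some tmp_len =>
        exact ih [] _ _ (by simp)

-- ===== VERDICT (by name: the statement is the Claim_ definition above) =====
theorem parse_s_cigar_spec : Claim_equal_parse_s_cigar := by
  intro s_cigar _ _
  unfold Spec_parse_s_cigar parse_s_cigar parse_s_cigar_alt
  rw [pvMain s_cigar.toList [] 0 0 (by simp)]
  rfl
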